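-- pv_equiv track=rewrite | github.com/rrwt/daily-coding-challenge | daily_problems/problem_201_to_300/246.py | _can_form_a_circle
-- ===== SOURCE A (Python) =====
-- def _can_form_a_circle(words: set, first: str, prev: str) -> bool:
--     if not words:
--         if prev[-1] == first[0]:
--             return True
--         return False
--
--     for word in words:
--         if word[0] == prev[-1]:
--             if _can_form_a_circle(words - {word}, first, word):
--                 return True
--
--     return False
-- ===== SOURCE B (Python) =====
-- def _can_form_a_circle(words: set, first: str, prev: str) -> bool:
--     # Eulerian-path test: each word is a directed edge word[0] -> word[-1];
--     # a chain using every word from prev[-1] to a word ending in first[0]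
--     # exists iff, after adding a virtual closing edge first[0] -> prev[-1],
--     # every character has out-degree == in-degree and every edge endpoint
--     # is (undirectedly) connected to prev[-1].
--     s = prev[-1]
--     t = first[0]
--     edges = [(w[0], w[-1]) for w in words]
--     edges.append((t, s))
--     bal = {}
--     for u, v in edges:
--         bal[u] = bal.get(u, 0) + 1
--         bal[v] = bal.get(v, 0) - 1
--     if any(d != 0 for d in bal.values()):
--         return False
--     verts = set()
--     for u, v in edges:
--         verts.add(u)
--         verts.add(v)
--     reach = {s}
--     for _ in range(len(verts)):
--         for u, v in edges:
--             if u in reach and v not in reach: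
--                 reach.add(v)
--             if v in reach and u not in reach:
--                 reach.add(u)
--     return all(x in reach for x in verts)
-- ===== Notes on version B (the rewrite author's own statement) =====
-- stated objective: faster
-- what changed: Replaces A's factorial-time recursive backtracking over word orderings by the Eulerian-path criterion on the directed graph whose edges are (word[0], word[-1]): add a virtual closing edge first[0]->prev[-1], then check per-character in/out-degree balance and undirected connectivity of all edge endpoints via a fixed-point relaxation.
-- outside the precondition, e.g. on _can_form_a_circle({'ab'}, '', 'xy'): A returns False, B raises IndexError
import Mathlib
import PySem

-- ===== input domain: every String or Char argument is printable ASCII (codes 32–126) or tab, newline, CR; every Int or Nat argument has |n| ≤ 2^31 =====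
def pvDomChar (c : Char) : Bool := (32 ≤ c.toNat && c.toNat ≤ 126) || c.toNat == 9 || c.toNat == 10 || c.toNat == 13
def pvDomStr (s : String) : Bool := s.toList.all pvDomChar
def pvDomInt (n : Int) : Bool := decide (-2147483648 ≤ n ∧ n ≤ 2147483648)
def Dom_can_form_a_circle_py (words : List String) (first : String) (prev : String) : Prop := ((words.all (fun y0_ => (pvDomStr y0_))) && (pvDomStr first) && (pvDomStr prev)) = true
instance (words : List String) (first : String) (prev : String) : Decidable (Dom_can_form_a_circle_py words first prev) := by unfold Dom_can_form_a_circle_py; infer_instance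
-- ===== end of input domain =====

-- B replaces A's factorial backtracking search by the Eulerian-path criterion on the
-- word-graph (per-character degree balance plus connectivity of all edge endpoints).

-- ===== PORT A =====
-- literal port of A's recursion; `words - {word}` is PySem.Set.diff words [word]
def can_form_a_circle_py (words : List String) (first : String) (prev : String) : Bool :=
  if words.isEmpty then
    match PySem.Str.pyGet? prev (-1), PySem.Str.pyGet? first 0 with
    | some pl, some f0 => pl == f0
    | _, _ => false
  else
    words.attach.any (fun ⟨word, hw⟩ =>
      match PySem.Str.pyGet? word 0, PySem.Str.pyGet? prev (-1) with
      | some w0, some pl =>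
        w0 == pl && can_form_a_circle_py (PySem.Set.diff words [word]) first word
      | _, _ => false)
termination_by words.length
decreasing_by
  simp only [PySem.Set.diff]
  exact List.length_filter_lt_length_iff_exists.2 ⟨word, hw, by simp⟩

-- ===== PORT B =====
-- helpers for w[0] / w[-1]; exact for the nonempty strings Pre_ admits
def pvHd (w : String) : Char := (PySem.Str.pyGet? w 0).getD ' '
def pvLst (w : String) : Char := (PySem.Str.pyGet? w (-1)).getD ' '
def pvEdge (w : String) : Char × Char := (pvHd w, pvLst w)

-- the two dict/set updates of Source B's balance and vertex loops, as named steps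
def pvBalStep (b : PySem.Dict Char Int) (uv : Char × Char) : PySem.Dict Char Int :=
  let b1 := b.insert uv.1 (b.getD uv.1 0 + 1)
  b1.insert uv.2 (b1.getD uv.2 0 - 1)

def pvVertStep (vs : PySem.Set Char) (uv : Char × Char) : PySem.Set Char :=
  PySem.Set.add (PySem.Set.add vs uv.1) uv.2

-- the body of Source B's inner relaxation loop: its two if-statements, as named steps
def pvRelaxEdge2 (r1 : PySem.Set Char) (uv : Char × Char) : PySem.Set Char :=
  if PySem.Set.contains r1 uv.2 && !PySem.Set.contains r1 uv.1 then PySem.Set.add r1 uv.1 else r1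

def pvRelaxEdge (r : PySem.Set Char) (uv : Char × Char) : PySem.Set Char :=
  pvRelaxEdge2
    (if PySem.Set.contains r uv.1 && !PySem.Set.contains r uv.2 then PySem.Set.add r uv.2 else r)
    uv

def can_form_a_circle_py_alt (words : List String) (first : String) (prev : String) : Bool :=
  match PySem.Str.pyGet? prev (-1) with
  | none => false
  | some s =>
    match PySem.Str.pyGet? first 0 with
    | none => false
    | some t =>
      let edges := words.map pvEdge ++ [(t, s)]
      let bal := edges.foldl pvBalStep PySem.Dict.empty
      if bal.values.any (fun d => d != 0) then false
      else
        let verts := edges.foldl pvVertStep PySem.Set.empty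
        let reach := (PySem.List.pyRange 0 (PySem.Set.len verts) 1).foldl
          (fun (r : PySem.Set Char) _ => edges.foldl pvRelaxEdge r)
          (PySem.Set.add PySem.Set.empty s)
        verts.all (fun x => PySem.Set.contains reach x)

-- ===== PRECONDITION & SPEC =====
-- Pre_ excludes empty strings (A's word[0]/prev[-1]/first[0] raise IndexError on them,
-- except that with an empty `first` A can return False before ever reading first[0],
-- where B's up-front first[0] read raises) and duplicate entries in `words`
-- (the parameter is a Python set, whose Lean counterpart holds distinct elements).
def Pre_can_form_a_circle_py (words : List String) (first : String) (prev : String) : Prop :=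
  words.Nodup ∧ first ≠ "" ∧ prev ≠ "" ∧ ∀ w ∈ words, w ≠ ""
instance (words : List String) (first : String) (prev : String) : Decidable (Pre_can_form_a_circle_py words first prev) := by unfold Pre_can_form_a_circle_py; infer_instance

def pvWitness_can_form_a_circle_py : List String × String × String := (["ab", "ba"], "ab", "ba")

def Spec_can_form_a_circle_py (words : List String) (first : String) (prev : String) (out : Bool) : Prop := out = can_form_a_circle_py_alt words first prev
instance (words : List String) (first : String) (prev : String) (out : Bool) : Decidable (Spec_can_form_a_circle_py words first prev out) := by unfold Spec_can_form_a_circle_py; infer_instance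

-- ===== CLAIM (what is proved, stated in full; the proofs are below) =====
def Claim_equal_can_form_a_circle_py : Prop := ∀ (words : List String) (first : String) (prev : String), Dom_can_form_a_circle_py words first prev → Pre_can_form_a_circle_py words first prev → Spec_can_form_a_circle_py words first prev (can_form_a_circle_py words first prev)

-- ===== LEMMAS AND PROOFS =====

-- ---- the common specification level: chains of words seen as directed edges ----

-- A's search, rephrased on the chars that matter: target char t, current char c
def pvChain (t : Char) (rem : List String) (c : Char) : Bool :=
  if rem.isEmpty then c == t
  else rem.attach.any (fun ⟨w, hw⟩ => pvHd w == c && pvChain t (rem.erase w) (pvLst w))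
termination_by rem.length
decreasing_by rw [List.length_erase_of_mem hw]; have := List.length_pos_of_mem hw; omega

inductive pvLinked : Char → List String → Char → Prop
  | nil (c : Char) : pvLinked c [] c
  | cons {c v : Char} {w : String} {l : List String} :
      pvHd w = c → pvLinked (pvLst w) l v → pvLinked c (w :: l) v

theorem pvLinked_nil_iff (c v : Char) : pvLinked c [] v ↔ c = v := by
  constructor
  · intro h; cases h; rfl
  · rintro rfl; exact pvLinked.nil c

theorem pvChain_iff_perm (t : Char) (rem : List String) (c : Char) :
    pvChain t rem c = true ↔ ∃ l, l.Perm rem ∧ pvLinked c l t := by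
  induction hn : rem.length using Nat.strong_induction_on generalizing rem c with
  | _ n ih =>
  subst hn
  rw [pvChain]
  by_cases hre : rem.isEmpty
  · rw [List.isEmpty_iff] at hre
    subst hre
    simp only [List.isEmpty_nil, if_true, beq_iff_eq]
    constructor
    · rintro rfl; exact ⟨[], List.Perm.refl _, pvLinked.nil c⟩
    · rintro ⟨l, hp, hl⟩
      rw [List.perm_nil] at hp; subst hp
      exact (pvLinked_nil_iff c t).1 hl
  · rw [if_neg hre]
    rw [List.any_eq_true]
    constructor
    · rintro ⟨⟨w, hw⟩, -, hb⟩
      rw [Bool.and_eq_true, beq_iff_eq] at hb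
      obtain ⟨hhd, hrec⟩ := hb
      have hlt : (rem.erase w).length < rem.length := by
        rw [List.length_erase_of_mem hw]; have := List.length_pos_of_mem hw; omega
      obtain ⟨l', hp', hl'⟩ := (ih _ hlt _ _ rfl).1 hrec
      refine ⟨w :: l', ?_, pvLinked.cons hhd hl'⟩
      exact (hp'.cons w).trans (List.perm_cons_erase hw).symm
    · rintro ⟨l, hp, hl⟩
      cases hl with
      | nil =>
        rw [List.nil_perm] at hp; subst hp; simp at hre
      | @cons _ _ w l' hhd hl' =>
        have hw : w ∈ rem := hp.mem_iff.1 (List.mem_cons_self ..)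
        refine ⟨⟨w, hw⟩, List.mem_attach _ _, ?_⟩
        rw [Bool.and_eq_true, beq_iff_eq]
        refine ⟨hhd, ?_⟩
        have hlt : (rem.erase w).length < rem.length := by
          rw [List.length_erase_of_mem hw]; have := List.length_pos_of_mem hw; omega
        refine (ih _ hlt _ _ rfl).2 ⟨l', ?_, hl'⟩
        exact (hp.trans (List.perm_cons_erase hw)).cons_inv

def pvOut (es : List (Char × Char)) (x : Char) : Nat := es.countP (fun e => e.1 == x)
def pvIn (es : List (Char × Char)) (x : Char) : Nat := es.countP (fun e => e.2 == x)
def pvBalanced (es : List (Char × Char)) : Prop := ∀ x, pvOut es x = pvIn es x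
def pvE (rem : List String) (t c : Char) : List (Char × Char) := rem.map pvEdge ++ [(t, c)]

inductive pvConn (es : List (Char × Char)) (a : Char) : Char → Prop
  | refl : pvConn es a a
  | fwd {u v : Char} : pvConn es a u → (u, v) ∈ es → pvConn es a v
  | bwd {u v : Char} : pvConn es a v → (u, v) ∈ es → pvConn es a u

def pvAllConn (es : List (Char × Char)) (c : Char) : Prop :=
  ∀ e ∈ es, pvConn es c e.1 ∧ pvConn es c e.2

theorem linked_count {c v : Char} {l : List String} (h : pvLinked c l v) (x : Char) :
    (pvOut (l.map pvEdge) x : Int) - pvIn (l.map pvEdge) x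
      = (if x = c then 1 else 0) - (if x = v then 1 else 0) := by
  induction h with
  | nil c => simp [pvOut, pvIn]
  | @cons c' v' w l' hhd hl ih =>
    simp only [pvOut, pvIn, List.map_cons, List.countP_cons,
      show (pvEdge w).1 = c' from hhd, show (pvEdge w).2 = pvLst w from rfl,
      beq_iff_eq] at ih ⊢
    rw [show ((if c' = x then (1:Nat) else 0) : Nat) = if x = c' then 1 else 0 by
          by_cases h : x = c' <;> simp [h, Ne.symm] <;> omega,
        show ((if pvLst w = x then (1:Nat) else 0) : Nat) = if x = pvLst w then 1 else 0 by
          by_cases h : x = pvLst w <;> simp [h, Ne.symm] <;> omega]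
    by_cases h1 : x = c' <;> by_cases h2 : x = pvLst w <;> by_cases h3 : x = v' <;>
      simp only [h1, h2, h3, eq_self_iff_true, if_true, if_neg, if_false] at ih ⊢ <;>
      push_cast at ih ⊢ <;> omega

theorem linked_balanced {t c : Char} {rem l : List String}
    (hp : l.Perm rem) (h : pvLinked c l t) : pvBalanced (pvE rem t c) := by
  intro x
  have hcnt := linked_count h x
  have hperm : (l.map pvEdge).Perm (rem.map pvEdge) := hp.map _
  simp only [pvOut, pvIn] at hcnt
  rw [hperm.countP_eq (fun e => e.1 == x), hperm.countP_eq (fun e => e.2 == x)] at hcnt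
  simp only [pvE, pvOut, pvIn, List.countP_append, List.countP_cons, List.countP_nil,
    beq_iff_eq]
  rw [show ((if t = x then (1:Nat) else 0) : Nat) = if x = t then 1 else 0 by
        by_cases h' : x = t <;> simp [h', Ne.symm],
      show ((if c = x then (1:Nat) else 0) : Nat) = if x = c then 1 else 0 by
        by_cases h' : x = c <;> simp [h', Ne.symm]]
  rcases eq_or_ne x t with rfl | h1 <;> rcases eq_or_ne x c with rfl | h2 <;>
    simp_all <;> push_cast at hcnt ⊢ <;> omega

theorem linked_conn {es : List (Char × Char)} {c : Char} :
    ∀ {a v : Char} {l : List String}, pvLinked a l v → pvConn es c a →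
      (∀ w ∈ l, pvEdge w ∈ es) →
      (∀ w ∈ l, pvConn es c (pvHd w) ∧ pvConn es c (pvLst w)) ∧ pvConn es c v := by
  intro a v l h
  induction h with
  | nil => exact fun hc _ => ⟨by simp, hc⟩
  | @cons c' v' w l' hhd hl ih =>
    intro hc hmem
    have hw : pvConn es c (pvHd w) := hhd ▸ hc
    have hwl : pvConn es c (pvLst w) :=
      pvConn.fwd hw (by have := hmem w (List.mem_cons_self ..); exact this)
    obtain ⟨hall, hv⟩ := ih hwl (fun w' hw' => hmem w' (List.mem_cons_of_mem _ hw'))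
    refine ⟨?_, hv⟩
    intro w' hw'
    rcases List.mem_cons.1 hw' with rfl | hw'
    · exact ⟨hw, hwl⟩
    · exact hall w' hw'

theorem linked_allconn {t c : Char} {rem l : List String}
    (hp : l.Perm rem) (h : pvLinked c l t) : pvAllConn (pvE rem t c) c := by
  have hmem : ∀ w ∈ l, pvEdge w ∈ pvE rem t c := by
    intro w hw
    exact List.mem_append_left _ (List.mem_map_of_mem (hp.mem_iff.1 hw))
  obtain ⟨hall, hv⟩ := linked_conn h (pvConn.refl) hmem
  intro e he
  rcases List.mem_append.1 he with he | he
  · obtain ⟨w, hw, rfl⟩ := List.mem_map.1 he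
    exact hall w ((hp.mem_iff).2 hw)
  · rcases List.mem_singleton.1 he with rfl
    exact ⟨hv, pvConn.refl⟩

theorem pv_ext (c : Char) (r : List String) :
    ∃ l r' v, r.Perm (l ++ r') ∧ pvLinked c l v ∧ ∀ w ∈ r', pvHd w ≠ v := by
  induction hn : r.length using Nat.strong_induction_on generalizing r c with
  | _ n ih =>
  subst hn
  by_cases h : ∃ w ∈ r, pvHd w = c
  · obtain ⟨w, hw, hhd⟩ := h
    have hlt : (r.erase w).length < r.length := by
      rw [List.length_erase_of_mem hw]; have := List.length_pos_of_mem hw; omega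
    obtain ⟨l, r', v, hperm, hlink, hstuck⟩ := ih _ hlt (pvLst w) _ rfl
    exact ⟨w :: l, r', v,
      (List.perm_cons_erase hw).trans (hperm.cons w), pvLinked.cons hhd hlink, hstuck⟩
  · push_neg at h
    exact ⟨[], r, c, by simp, pvLinked.nil c, h⟩

theorem count_out_eq_zero {r : List String} {v : Char} (h : ∀ w ∈ r, pvHd w ≠ v) :
    (r.map pvEdge).countP (fun e => e.1 == v) = 0 := by
  rw [List.countP_eq_zero]
  intro e he
  obtain ⟨w, hw, rfl⟩ := List.mem_map.1 he
  simpa [pvEdge] using h w hw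

theorem pvIndFlip (a b : Char) : (if a = b then (1 : Nat) else 0) = if b = a then 1 else 0 := by
  rcases eq_or_ne a b with rfl | h
  · rfl
  · rw [if_neg h, if_neg (Ne.symm h)]

theorem stuck_eq_target {t c v : Char} {rem l r : List String}
    (hb : pvBalanced (pvE rem t c)) (hp : rem.Perm (l ++ r)) (hl : pvLinked c l v)
    (hstuck : ∀ w ∈ r, pvHd w ≠ v) : v = t := by
  have hcnt := linked_count hl v
  have hbv := hb v
  have hperm : (rem.map pvEdge).Perm ((l ++ r).map pvEdge) := hp.map _
  simp only [pvE, pvOut, pvIn, List.countP_append, List.countP_cons, List.countP_nil,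
    beq_iff_eq] at hbv
  rw [hperm.countP_eq (fun e => e.1 == v), hperm.countP_eq (fun e => e.2 == v)] at hbv
  rw [List.map_append, List.countP_append, List.countP_append] at hbv
  rw [count_out_eq_zero hstuck] at hbv
  simp only [pvOut, pvIn] at hcnt
  rw [pvIndFlip t v, pvIndFlip c v] at hbv
  by_contra hne
  rw [if_neg hne] at hbv
  rcases eq_or_ne v c with rfl | h2
  · simp only [eq_self_iff_true, if_true] at hbv hcnt; omega
  · simp only [eq_self_iff_true, if_true, h2, if_false] at hbv hcnt; omega

theorem stuck_closed {x v : Char} {r0 l r : List String}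
    (hb : ∀ ch, pvOut (r0.map pvEdge) ch = pvIn (r0.map pvEdge) ch)
    (hp : r0.Perm (l ++ r)) (hl : pvLinked x l v)
    (hstuck : ∀ w ∈ r, pvHd w ≠ v) : v = x := by
  have hcnt := linked_count hl v
  have hbv := hb v
  have hperm : (r0.map pvEdge).Perm ((l ++ r).map pvEdge) := hp.map _
  simp only [pvOut, pvIn] at hbv hcnt
  rw [hperm.countP_eq (fun e => e.1 == v), hperm.countP_eq (fun e => e.2 == v)] at hbv
  rw [List.map_append, List.countP_append, List.countP_append] at hbv
  rw [count_out_eq_zero hstuck] at hbv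
  by_contra hne
  simp only [eq_self_iff_true, if_true, if_neg hne] at hcnt
  omega

theorem remainder_balanced {t c : Char} {rem l r : List String}
    (hb : pvBalanced (pvE rem t c)) (hp : rem.Perm (l ++ r)) (hl : pvLinked c l t) :
    ∀ ch, pvOut (r.map pvEdge) ch = pvIn (r.map pvEdge) ch := by
  intro ch
  have hcnt := linked_count hl ch
  have hbv := hb ch
  have hperm : (rem.map pvEdge).Perm ((l ++ r).map pvEdge) := hp.map _
  simp only [pvE, pvOut, pvIn, List.countP_append, List.countP_cons, List.countP_nil,
    beq_iff_eq] at hbv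
  rw [hperm.countP_eq (fun e => e.1 == ch), hperm.countP_eq (fun e => e.2 == ch)] at hbv
  rw [List.map_append, List.countP_append, List.countP_append] at hbv
  simp only [pvOut, pvIn] at hcnt ⊢
  rw [pvIndFlip t ch, pvIndFlip c ch] at hbv
  rcases eq_or_ne ch t with rfl | h1
  · rcases eq_or_ne ch c with rfl | h2
    · simp only [eq_self_iff_true, if_true] at hbv hcnt; omega
    · simp only [eq_self_iff_true, if_true, h2, if_false] at hbv hcnt; omega
  · rcases eq_or_ne ch c with rfl | h2
    · simp only [eq_self_iff_true, if_true, h1, if_false] at hbv hcnt; omega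
    · simp only [h1, h2, if_false] at hbv hcnt; omega

def pvChars (c : Char) (l : List String) : List Char := c :: l.map pvLst

theorem linked_chars_split {c t x : Char} {l : List String}
    (hl : pvLinked c l t) (hx : x ∈ pvChars c l) :
    ∃ l1 l2, l = l1 ++ l2 ∧ pvLinked c l1 x ∧ pvLinked x l2 t := by
  induction hl with
  | nil c =>
    simp [pvChars] at hx
    subst hx
    exact ⟨[], [], rfl, pvLinked.nil x, pvLinked.nil x⟩
  | @cons c' v' w l' hhd hlk ih =>
    rcases List.mem_cons.1 hx with rfl | hx'
    · exact ⟨[], w :: l', rfl, pvLinked.nil x, pvLinked.cons hhd hlk⟩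
    · obtain ⟨l1, l2, rfl, ha, hb2⟩ := ih hx'
      exact ⟨w :: l1, l2, rfl, pvLinked.cons hhd ha, hb2⟩

theorem linked_mem_chars {c v : Char} {l : List String} (h : pvLinked c l v) :
    (∀ w ∈ l, pvHd w ∈ pvChars c l ∧ pvLst w ∈ pvChars c l) ∧ v ∈ pvChars c l := by
  induction h with
  | nil c => exact ⟨by simp, by simp [pvChars]⟩
  | @cons c' v' w l' hhd hlk ih =>
    have hsub : ∀ y, y ∈ pvChars (pvLst w) l' → y ∈ pvChars c' (w :: l') := by
      intro y hy
      have hch : pvChars c' (w :: l') = c' :: pvLst w :: l'.map pvLst := by simp [pvChars]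
      rw [hch]
      rcases List.mem_cons.1 hy with rfl | hy'
      · simp
      · simp [hy']
    refine ⟨?_, hsub _ ih.2⟩
    intro w' hw'
    rcases List.mem_cons.1 hw' with rfl | hw'
    · exact ⟨by simp [pvChars, hhd], by simp [pvChars]⟩
    · exact ⟨hsub _ (ih.1 w' hw').1, hsub _ (ih.1 w' hw').2⟩

theorem linked_append {a b d : Char} {l1 l2 : List String}
    (h1 : pvLinked a l1 b) (h2 : pvLinked b l2 d) : pvLinked a (l1 ++ l2) d := by
  induction h1 with
  | nil => simpa using h2
  | cons hhd _ ih => exact pvLinked.cons hhd (ih h2)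

theorem closed_tour {r : List String}
    (hb : ∀ ch, pvOut (r.map pvEdge) ch = pvIn (r.map pvEdge) ch)
    {w0 : String} (hw0 : w0 ∈ r) :
    ∃ m r2, r.Perm (m ++ r2) ∧ m ≠ [] ∧ pvLinked (pvHd w0) m (pvHd w0) := by
  obtain ⟨l, r', v, hperm, hlink, hstuck⟩ := pv_ext (pvLst w0) (r.erase w0)
  have hp2 : r.Perm ((w0 :: l) ++ r') := (List.perm_cons_erase hw0).trans (hperm.cons w0)
  have hlk : pvLinked (pvHd w0) (w0 :: l) v := pvLinked.cons rfl hlink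
  have hvx : v = pvHd w0 := stuck_closed hb hp2 hlk hstuck
  exact ⟨w0 :: l, r', hp2, by simp, hvx ▸ hlk⟩

theorem conn_touch {t c : Char} {rem l r : List String}
    (hp : rem.Perm (l ++ r)) (hl : pvLinked c l t) :
    ∀ {u}, pvConn (pvE rem t c) c u →
      u ∈ pvChars c l ∨ ∃ x ∈ pvChars c l, ∃ w ∈ r, pvHd w = x ∨ pvLst w = x := by
  have hT : t ∈ pvChars c l := (linked_mem_chars hl).2
  have hfwd : ∀ {u v2 : Char}, (u, v2) ∈ pvE rem t c → u ∈ pvChars c l →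
      v2 ∈ pvChars c l ∨ ∃ x ∈ pvChars c l, ∃ w ∈ r, pvHd w = x ∨ pvLst w = x := by
    intro u v2 he hu
    rcases List.mem_append.1 he with he | he
    · obtain ⟨w, hw, heq⟩ := List.mem_map.1 he
      obtain ⟨h1, h2⟩ := Prod.mk.injEq .. ▸ heq
      rcases List.mem_append.1 (hp.mem_iff.1 hw) with hwl | hwr
      · exact Or.inl (h2 ▸ ((linked_mem_chars hl).1 w hwl).2)
      · exact Or.inr ⟨u, hu, w, hwr, Or.inl h1⟩
    · rcases List.mem_singleton.1 he with heq
      obtain ⟨h1, h2⟩ := Prod.mk.injEq .. ▸ heq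
      subst h2
      exact Or.inl (List.mem_cons_self ..)
  have hbwd : ∀ {u v2 : Char}, (u, v2) ∈ pvE rem t c → v2 ∈ pvChars c l →
      u ∈ pvChars c l ∨ ∃ x ∈ pvChars c l, ∃ w ∈ r, pvHd w = x ∨ pvLst w = x := by
    intro u v2 he hv
    rcases List.mem_append.1 he with he | he
    · obtain ⟨w, hw, heq⟩ := List.mem_map.1 he
      obtain ⟨h1, h2⟩ := Prod.mk.injEq .. ▸ heq
      rcases List.mem_append.1 (hp.mem_iff.1 hw) with hwl | hwr
      · exact Or.inl (h1 ▸ ((linked_mem_chars hl).1 w hwl).1)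
      · exact Or.inr ⟨v2, hv, w, hwr, Or.inr h2⟩
    · rcases List.mem_singleton.1 he with heq
      obtain ⟨h1, h2⟩ := Prod.mk.injEq .. ▸ heq
      subst h1
      exact Or.inl hT
  intro u h
  induction h with
  | refl => exact Or.inl (List.mem_cons_self ..)
  | fwd hconn he ih =>
    rcases ih with hu | hr
    · exact hfwd he hu
    · exact Or.inr hr
  | bwd hconn he ih =>
    rcases ih with hu | hr
    · exact hbwd he hu
    · exact Or.inr hr

theorem exists_out_edge {r : List String} {x : Char}
    (h : 0 < pvOut (r.map pvEdge) x) : ∃ w ∈ r, pvHd w = x := by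
  simp only [pvOut] at h
  obtain ⟨e, he, hpe⟩ := List.countP_pos_iff.1 h
  obtain ⟨w, hw, rfl⟩ := List.mem_map.1 he
  exact ⟨w, hw, by simpa [pvEdge] using hpe⟩

theorem pv_grow {t c : Char} {rem : List String}
    (hb : pvBalanced (pvE rem t c)) (hc : pvAllConn (pvE rem t c) c) :
    ∀ n (l r : List String), r.length = n → rem.Perm (l ++ r) → pvLinked c l t →
      ∃ l', l'.Perm rem ∧ pvLinked c l' t := by
  intro n
  induction n using Nat.strong_induction_on with
  | _ n ih =>
  intro l r hn hp hl
  rcases eq_or_ne r [] with rfl | hrne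
  · exact ⟨l, by simpa using hp.symm, hl⟩
  obtain ⟨w0, hw0⟩ := List.exists_mem_of_ne_nil r hrne
  -- w0 is an unused word; find a trail vertex x with an unused out-edge at x
  have hbr := remainder_balanced hb hp hl
  have hconn : pvConn (pvE rem t c) c (pvHd w0) := by
    have hmem : pvEdge w0 ∈ pvE rem t c :=
      List.mem_append_left _ (List.mem_map_of_mem (hp.mem_iff.2 (List.mem_append_right _ hw0)))
    exact (hc _ hmem).1
  have htouch := conn_touch hp hl hconn
  have hx : ∃ x ∈ pvChars c l, ∃ w ∈ r, pvHd w = x := by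
    rcases htouch with hu | ⟨x, hxc, w, hwr, hcase⟩
    · exact ⟨pvHd w0, hu, w0, hw0, rfl⟩
    · rcases hcase with h1 | h1
      · exact ⟨x, hxc, w, hwr, h1⟩
      · -- only an in-edge at x: balance of the remainder gives an out-edge too
        have hin : 0 < pvIn (r.map pvEdge) x := by
          simp only [pvIn]
          rw [List.countP_pos_iff]
          exact ⟨pvEdge w, List.mem_map_of_mem hwr, by simp [pvEdge, h1]⟩
        obtain ⟨w', hw', hhd'⟩ := exists_out_edge (hbr x ▸ hin)
        exact ⟨x, hxc, w', hw', hhd'⟩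
  obtain ⟨x, hxc, w', hw', hhd'⟩ := hx
  obtain ⟨m, r2, hpr, hmne, hm⟩ := closed_tour hbr hw'
  rw [hhd'] at hm
  obtain ⟨l1, l2, rfl, hl1, hl2⟩ := linked_chars_split hl hxc
  have hlk' : pvLinked c (l1 ++ (m ++ l2)) t := linked_append hl1 (linked_append hm hl2)
  have hp' : rem.Perm ((l1 ++ (m ++ l2)) ++ r2) := by
    have h1 : rem.Perm ((l1 ++ l2) ++ (m ++ r2)) :=
      hp.trans (List.Perm.append_left _ hpr)
    have h2 : ((l1 ++ l2) ++ (m ++ r2)) = l1 ++ ((l2 ++ m) ++ r2) := by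
      simp [List.append_assoc]
    have h3 : (l1 ++ ((l2 ++ m) ++ r2)).Perm (l1 ++ ((m ++ l2) ++ r2)) :=
      List.Perm.append_left l1 (List.perm_append_comm.append_right r2)
    have h4 : l1 ++ ((m ++ l2) ++ r2) = (l1 ++ (m ++ l2)) ++ r2 := by
      simp [List.append_assoc]
    rw [h4] at h3
    exact (h2 ▸ h1).trans h3
  have hlt : r2.length < n := by
    have := hpr.length_eq
    have hml : 0 < m.length := List.length_pos_iff.2 hmne
    simp only [List.length_append] at this
    omega
  exact ih _ hlt _ _ rfl hp' hlk'

theorem euler_back {t c : Char} {rem : List String}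
    (hb : pvBalanced (pvE rem t c)) (hc : pvAllConn (pvE rem t c) c) :
    ∃ l, l.Perm rem ∧ pvLinked c l t := by
  obtain ⟨l, r, v, hp, hl, hstuck⟩ := pv_ext c rem
  have hv : v = t := stuck_eq_target hb hp hl hstuck
  subst hv
  exact pv_grow hb hc _ l r rfl hp hl

theorem euler (t : Char) (rem : List String) (c : Char) :
    pvChain t rem c = true ↔ pvBalanced (pvE rem t c) ∧ pvAllConn (pvE rem t c) c := by
  rw [pvChain_iff_perm]
  constructor
  · rintro ⟨l, hp, hl⟩
    exact ⟨linked_balanced hp hl, linked_allconn hp hl⟩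
  · rintro ⟨hb, hc⟩
    exact euler_back hb hc

theorem pyGet_last_some (s : String) (h : s ≠ "") :
    PySem.Str.pyGet? s (-1) = some (pvLst s) := by
  have hl : s.toList ≠ [] := fun hh => h (String.toList_eq_nil_iff.1 hh)
  cases h2 : PySem.Str.pyGet? s (-1) with
  | some a => simp only [pvLst, h2, Option.getD_some]
  | none =>
    exfalso
    rw [show PySem.Str.pyGet? s (-1) = PySem.List.pyGet? s.toList (-1) from by
          simp [PySem.Str.pyGet?],
        PySem.List.pyGet?_neg_one] at h2
    exact hl (List.getLast?_eq_none_iff.1 h2)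

theorem pyGet_first_some (s : String) (h : s ≠ "") :
    PySem.Str.pyGet? s 0 = some (pvHd s) := by
  have hl : s.toList ≠ [] := fun hh => h (String.toList_eq_nil_iff.1 hh)
  cases h2 : PySem.Str.pyGet? s 0 with
  | some a => simp only [pvHd, h2, Option.getD_some]
  | none =>
    exfalso
    rw [show PySem.Str.pyGet? s 0 = PySem.List.pyGet? s.toList 0 from by
          simp [PySem.Str.pyGet?],
        PySem.List.pyGet?_zero] at h2
    rw [List.getElem?_eq_none_iff] at h2
    exact hl (List.eq_nil_of_length_eq_zero (by omega))

theorem diff_single_eq_erase {words : List String} (hnd : words.Nodup) (w : String) :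
    PySem.Set.diff words [w] = words.erase w := by
  rw [List.Nodup.erase_eq_filter hnd, PySem.Set.diff]
  apply List.filter_congr
  intro x _
  rcases eq_or_ne x w with rfl | hxw
  · simp
  · simp [hxw, Ne.symm hxw]

theorem portA_eq_chain : ∀ n (words : List String), words.length = n →
    ∀ (first prev : String), words.Nodup → first ≠ "" → prev ≠ "" →
    (∀ w ∈ words, w ≠ "") →
    can_form_a_circle_py words first prev = pvChain (pvHd first) words (pvLst prev) := by
  intro n
  induction n using Nat.strong_induction_on with
  | _ n ih =>
  intro words hn first prev hnd hf hp hws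
  rw [can_form_a_circle_py, pvChain]
  by_cases he : words.isEmpty
  · rw [if_pos he, if_pos he, pyGet_last_some prev hp, pyGet_first_some first hf]
  · rw [if_neg he, if_neg he]
    refine List.any_congr rfl ?_
    rintro ⟨w, hw⟩
    dsimp only
    rw [pyGet_first_some w (hws w hw), pyGet_last_some prev hp]
    rw [diff_single_eq_erase hnd w]
    have hlt : (words.erase w).length < n := by
      rw [List.length_erase_of_mem hw]; have := List.length_pos_of_mem hw; omega
    rw [ih _ (hn ▸ hlt) _ rfl first w (hnd.erase w) hf (hws w hw)
      (fun w' hw' => hws w' (List.mem_of_mem_erase hw'))]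

theorem balStep_getD (b : PySem.Dict Char Int) (e : Char × Char) (x : Char) :
    (pvBalStep b e).getD x 0
      = b.getD x 0 + (if e.1 = x then 1 else 0) - (if e.2 = x then 1 else 0) := by
  simp only [pvBalStep, PySem.Dict.getD_insert]
  by_cases h1 : x = e.1 <;> by_cases h2 : x = e.2
  · have h3 : e.2 = e.1 := by rw [← h2, ← h1]
    rw [if_pos h2, if_pos h3, if_pos h1.symm, if_pos h2.symm, h1]
    try ring
  · rw [if_neg h2, if_pos h1, if_pos h1.symm, if_neg (fun hh : e.2 = x => h2 hh.symm), h1]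
    ring
  · have h3 : e.2 ≠ e.1 := fun hh => h1 (h2.trans hh)
    rw [if_pos h2, if_neg h3, if_neg (fun hh : e.1 = x => h1 hh.symm), if_pos h2.symm, ← h2]
    ring
  · rw [if_neg h2, if_neg h1, if_neg (fun hh : e.1 = x => h1 hh.symm),
      if_neg (fun hh : e.2 = x => h2 hh.symm)]
    ring

theorem balStep_mem_keys (b : PySem.Dict Char Int) (e : Char × Char) (x : Char) :
    x ∈ (pvBalStep b e).keys ↔ e.1 = x ∨ e.2 = x ∨ x ∈ b.keys := by
  simp only [pvBalStep, PySem.Dict.mem_keys_insert, eq_comm]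
  tauto

theorem bal_spec (es : List (Char × Char)) :
    (es.foldl pvBalStep PySem.Dict.empty).keys.Nodup ∧
    (∀ x, (es.foldl pvBalStep PySem.Dict.empty).getD x 0 = (pvOut es x : Int) - pvIn es x) ∧
    (∀ x, x ∈ (es.foldl pvBalStep PySem.Dict.empty).keys ↔ 0 < pvOut es x ∨ 0 < pvIn es x) := by
  induction es using List.reverseRecOn with
  | nil =>
    refine ⟨by simp [PySem.Dict.keys_empty], ?_, ?_⟩
    · intro x; simp [PySem.Dict.getD_empty, pvOut, pvIn]
    · intro x; simp [PySem.Dict.keys_empty, pvOut, pvIn]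
  | append_singleton es e ih =>
    obtain ⟨ihnd, ihg, ihk⟩ := ih
    rw [List.foldl_concat]
    refine ⟨?_, ?_, ?_⟩
    · exact PySem.Dict.nodup_keys_insert _ _ _ (PySem.Dict.nodup_keys_insert _ _ _ ihnd)
    · intro x
      rw [balStep_getD, ihg x]
      simp only [pvOut, pvIn, List.countP_append, List.countP_cons, List.countP_nil,
        beq_iff_eq]
      by_cases h1 : e.1 = x <;> by_cases h2 : e.2 = x <;>
        simp only [h1, h2, if_true, if_false, eq_self_iff_true] <;> push_cast <;> omega
    · intro x
      rw [balStep_mem_keys, ihk x]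
      simp only [pvOut, pvIn, List.countP_append, List.countP_cons, List.countP_nil,
        beq_iff_eq]
      by_cases h1 : e.1 = x <;> by_cases h2 : e.2 = x <;>
        simp only [h1, h2, if_true, if_false, eq_self_iff_true] <;>
        first | omega | (constructor <;> intro hcase <;> first | omega | tauto)

theorem bal_check (es : List (Char × Char)) :
    ((es.foldl pvBalStep PySem.Dict.empty).values.any (fun d => d != 0)) = false
      ↔ pvBalanced es := by
  obtain ⟨hnd, hg, hk⟩ := bal_spec es
  rw [List.any_eq_false]
  constructor
  · intro hall x
    by_cases hx : x ∈ (es.foldl pvBalStep PySem.Dict.empty).keys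
    · obtain ⟨⟨k, pv⟩, hp, hfst⟩ := List.mem_map.1 hx
      have hfst' : k = x := hfst
      subst hfst'
      have hv : pv ∈ (es.foldl pvBalStep PySem.Dict.empty).values :=
        List.mem_map_of_mem (f := fun q => q.2) hp
      have h0 : pv = 0 := by simpa using hall _ hv
      have hgd : (es.foldl pvBalStep PySem.Dict.empty).getD k 0 = pv :=
        PySem.Dict.getD_of_mem_items _ hp hnd 0
      have hgx := hg k
      rw [hgd, h0] at hgx
      omega
    · have h1 : ¬(0 < pvOut es x ∨ 0 < pvIn es x) := fun hh => hx ((hk x).2 hh)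
      push_neg at h1
      omega
  · intro hbal v hv
    obtain ⟨⟨k, pv⟩, hp, hsnd⟩ := List.mem_map.1 hv
    have hsnd' : pv = v := hsnd
    subst hsnd'
    have hgd : (es.foldl pvBalStep PySem.Dict.empty).getD k 0 = pv :=
      PySem.Dict.getD_of_mem_items _ hp hnd 0
    have hgx := hg k
    rw [hgd] at hgx
    have := hbal k
    simp only [bne_iff_ne, ne_eq, not_not]
    omega

theorem vertStep_mem (vs : PySem.Set Char) (e : Char × Char) (x : Char) :
    x ∈ pvVertStep vs e ↔ e.1 = x ∨ e.2 = x ∨ x ∈ vs := by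
  simp only [pvVertStep, PySem.Set.mem_add, eq_comm]
  tauto

theorem verts_spec (es : List (Char × Char)) :
    (es.foldl pvVertStep PySem.Set.empty).Nodup ∧
    (∀ x, x ∈ es.foldl pvVertStep PySem.Set.empty ↔ 0 < pvOut es x ∨ 0 < pvIn es x) := by
  induction es using List.reverseRecOn with
  | nil =>
    refine ⟨by simp [PySem.Set.empty], ?_⟩
    intro x; simp [PySem.Set.empty, pvOut, pvIn]
  | append_singleton es e ih =>
    obtain ⟨ihnd, ihk⟩ := ih
    rw [List.foldl_concat]
    refine ⟨PySem.Set.nodup_add _ _ (PySem.Set.nodup_add _ _ ihnd), ?_⟩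
    intro x
    rw [vertStep_mem, ihk x]
    simp only [pvOut, pvIn, List.countP_append, List.countP_cons, List.countP_nil,
      beq_iff_eq]
    by_cases h1 : e.1 = x <;> by_cases h2 : e.2 = x <;>
      simp only [h1, h2, if_true, if_false, eq_self_iff_true] <;>
      first | omega | (constructor <;> intro hcase <;> first | omega | tauto)

theorem add_append (r : PySem.Set Char) (x : Char) :
    ∃ δ : List Char, PySem.Set.add r x = r ++ δ := by
  unfold PySem.Set.add
  split_ifs
  · exact ⟨[], by simp⟩
  · exact ⟨[x], rfl⟩

theorem ite_add_append (rr : PySem.Set Char) (c : Bool) (y : Char) :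
    ∃ δ : List Char, (if c = true then PySem.Set.add rr y else rr) = rr ++ δ := by
  cases c
  · exact ⟨[], by simp⟩
  · simpa using add_append rr y

theorem relax_append (r : PySem.Set Char) (e : Char × Char) :
    ∃ δ : List Char, pvRelaxEdge r e = r ++ δ := by
  unfold pvRelaxEdge pvRelaxEdge2
  obtain ⟨δ1, h1⟩ := ite_add_append r (PySem.Set.contains r e.1 && !PySem.Set.contains r e.2) e.2
  rw [h1]
  obtain ⟨δ2, h2⟩ :=
    ite_add_append (r ++ δ1)
      (PySem.Set.contains (r ++ δ1) e.2 && !PySem.Set.contains (r ++ δ1) e.1) e.1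
  rw [h2, List.append_assoc]
  exact ⟨δ1 ++ δ2, rfl⟩

theorem foldl_relax_append (es : List (Char × Char)) :
    ∀ r, ∃ δ : List Char, es.foldl pvRelaxEdge r = r ++ δ := by
  induction es with
  | nil => exact fun r => ⟨[], by simp⟩
  | cons e es ih =>
    intro r
    obtain ⟨δ1, h1⟩ := relax_append r e
    obtain ⟨δ2, h2⟩ := ih (pvRelaxEdge r e)
    exact ⟨δ1 ++ δ2, by rw [List.foldl_cons, h2, h1, List.append_assoc]⟩

theorem set_contains_iff (r : PySem.Set Char) (x : Char) :
    PySem.Set.contains r x = true ↔ x ∈ r := by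
  simp [PySem.Set.contains]

theorem mem_ite_add {rr : PySem.Set Char} {c : Bool} {y x : Char}
    (hx : x ∈ (if c = true then PySem.Set.add rr y else rr)) : x ∈ rr ∨ (x = y ∧ c = true) := by
  cases c
  · simp at hx; exact Or.inl hx
  · simp only [if_pos rfl] at hx
    rcases (PySem.Set.mem_add rr y x).1 hx with h | h
    · exact Or.inl h
    · exact Or.inr ⟨h, rfl⟩

theorem relax_sound {es0 : List (Char × Char)} {s : Char} {e : Char × Char} (he : e ∈ es0)
    {r : PySem.Set Char} (hr : ∀ x ∈ r, pvConn es0 s x) :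
    ∀ x ∈ pvRelaxEdge r e, pvConn es0 s x := by
  unfold pvRelaxEdge pvRelaxEdge2
  have he' : (e.1, e.2) ∈ es0 := by rwa [Prod.mk.eta]
  have hr1 : ∀ x ∈ (if (PySem.Set.contains r e.1 && !PySem.Set.contains r e.2) = true
      then PySem.Set.add r e.2 else r), pvConn es0 s x := by
    intro x hx
    rcases mem_ite_add hx with hx' | ⟨rfl, hc⟩
    · exact hr x hx'
    · rw [Bool.and_eq_true, set_contains_iff] at hc
      exact pvConn.fwd (hr _ hc.1) he'
  intro x hx
  rcases mem_ite_add hx with hx' | ⟨rfl, hc⟩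
  · exact hr1 x hx'
  · rw [Bool.and_eq_true, set_contains_iff] at hc
    exact pvConn.bwd (hr1 _ hc.1) he'

theorem relax_mem_src {e : Char × Char} {r : PySem.Set Char} :
    ∀ x ∈ pvRelaxEdge r e, x ∈ r ∨ x = e.1 ∨ x = e.2 := by
  unfold pvRelaxEdge pvRelaxEdge2
  intro x hx
  rcases mem_ite_add hx with hx' | ⟨rfl, -⟩
  · rcases mem_ite_add hx' with hx'' | ⟨rfl, -⟩
    · exact Or.inl hx''
    · exact Or.inr (Or.inr rfl)
  · exact Or.inr (Or.inl rfl)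

theorem relax_nodup {e : Char × Char} {r : PySem.Set Char} (h : r.Nodup) :
    (pvRelaxEdge r e).Nodup := by
  unfold pvRelaxEdge pvRelaxEdge2
  split_ifs with h1 h2 h3
  · exact PySem.Set.nodup_add _ _ (PySem.Set.nodup_add _ _ h)
  · exact PySem.Set.nodup_add _ _ h
  · exact PySem.Set.nodup_add _ _ h
  · exact h

theorem foldl_relax_sound {es0 : List (Char × Char)} {s : Char} :
    ∀ {es : List (Char × Char)}, (∀ e ∈ es, e ∈ es0) →
    ∀ (r : PySem.Set Char), (∀ x ∈ r, pvConn es0 s x) →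
    ∀ x ∈ es.foldl pvRelaxEdge r, pvConn es0 s x := by
  intro es
  induction es with
  | nil => intro _ r hr; simpa using hr
  | cons e es ih =>
    intro hsub r hr
    rw [List.foldl_cons]
    exact ih (fun e' he' => hsub e' (List.mem_cons_of_mem _ he'))
      _ (relax_sound (hsub e (List.mem_cons_self ..)) hr)

theorem foldl_relax_mem {es : List (Char × Char)} :
    ∀ (r : PySem.Set Char) (x : Char), x ∈ es.foldl pvRelaxEdge r →
      x ∈ r ∨ ∃ e ∈ es, x = e.1 ∨ x = e.2 := by
  induction es with
  | nil => intro r x hx; exact Or.inl hx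
  | cons e es ih =>
    intro r x hx
    rw [List.foldl_cons] at hx
    rcases ih _ _ hx with hx' | ⟨e', he', hcase⟩
    · rcases relax_mem_src _ hx' with h | h
      · exact Or.inl h
      · exact Or.inr ⟨e, List.mem_cons_self .., h⟩
    · exact Or.inr ⟨e', List.mem_cons_of_mem _ he', hcase⟩

theorem foldl_relax_nodup {es : List (Char × Char)} :
    ∀ {r : PySem.Set Char}, r.Nodup → (es.foldl pvRelaxEdge r).Nodup := by
  induction es with
  | nil => exact fun h => h
  | cons e es ih => intro r hr; rw [List.foldl_cons]; exact ih (relax_nodup hr)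

theorem relax_eq_closure {r : PySem.Set Char} {e : Char × Char}
    (h : pvRelaxEdge r e = r) : (e.1 ∈ r → e.2 ∈ r) ∧ (e.2 ∈ r → e.1 ∈ r) := by
  constructor
  · intro h1
    by_contra h2
    have hc : (PySem.Set.contains r e.1 && !PySem.Set.contains r e.2) = true := by
      rw [Bool.and_eq_true, set_contains_iff, Bool.not_eq_eq_eq_not, Bool.not_true,
        ← Bool.not_eq_true, set_contains_iff]
      exact ⟨h1, h2⟩
    have hadd : PySem.Set.add r e.2 = r ++ [e.2] := by
      unfold PySem.Set.add
      rw [if_neg]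
      rw [set_contains_iff]
      exact h2
    unfold pvRelaxEdge at h
    rw [if_pos hc, hadd] at h
    obtain ⟨δ, hδ⟩ := ite_add_append (r ++ [e.2])
      (PySem.Set.contains (r ++ [e.2]) e.2 && !PySem.Set.contains (r ++ [e.2]) e.1) e.1
    unfold pvRelaxEdge2 at h
    rw [hδ] at h
    have := congrArg List.length h
    simp at this
  · intro h2
    by_contra h1
    have hr1 : (PySem.Set.contains r e.1 && !PySem.Set.contains r e.2) = false := by
      rw [Bool.and_eq_false_iff]
      left
      rw [← Bool.not_eq_true, set_contains_iff]
      exact h1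
    have hc : (PySem.Set.contains r e.2 && !PySem.Set.contains r e.1) = true := by
      rw [Bool.and_eq_true, set_contains_iff, Bool.not_eq_eq_eq_not, Bool.not_true,
        ← Bool.not_eq_true, set_contains_iff]
      exact ⟨h2, h1⟩
    have hadd : PySem.Set.add r e.1 = r ++ [e.1] := by
      unfold PySem.Set.add
      rw [if_neg]
      rw [set_contains_iff]
      exact h1
    unfold pvRelaxEdge pvRelaxEdge2 at h
    rw [hr1] at h
    simp only [Bool.false_eq_true, if_false] at h
    rw [if_pos hc, hadd] at h
    have := congrArg List.length h
    simp at this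

theorem foldl_relax_fix {es : List (Char × Char)} :
    ∀ {r : PySem.Set Char}, es.foldl pvRelaxEdge r = r →
      ∀ e ∈ es, (e.1 ∈ r → e.2 ∈ r) ∧ (e.2 ∈ r → e.1 ∈ r) := by
  induction es with
  | nil => intro r _ e he; simp at he
  | cons e0 es ih =>
    intro r hfix e he
    rw [List.foldl_cons] at hfix
    obtain ⟨δ1, h1⟩ := relax_append r e0
    obtain ⟨δ2, h2⟩ := foldl_relax_append es (pvRelaxEdge r e0)
    rw [h2, h1, List.append_assoc] at hfix
    have hlen := congrArg List.length hfix
    simp only [List.length_append] at hlen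
    have hδ1 : δ1 = [] := List.eq_nil_of_length_eq_zero (by omega)
    have hδ2 : δ2 = [] := List.eq_nil_of_length_eq_zero (by omega)
    have hre : pvRelaxEdge r e0 = r := by rw [h1, hδ1, List.append_nil]
    rcases List.mem_cons.1 he with rfl | he'
    · exact relax_eq_closure hre
    · have hfix' : es.foldl pvRelaxEdge r = r := by
        rw [hre] at h2
        rw [h2, hδ2, List.append_nil]
      exact ih hfix' e he'

theorem foldl_const_iterate {α β : Type} (f : α → α) :
    ∀ (l : List β) (init : α), l.foldl (fun r _ => f r) init = f^[l.length] init := by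
  intro l
  induction l with
  | nil => intro init; rfl
  | cons b l ih =>
    intro init
    rw [List.foldl_cons, ih, List.length_cons, Function.iterate_succ_apply]

theorem nodup_subset_length {l1 l2 : List Char} (h1 : l1.Nodup)
    (h2 : ∀ x ∈ l1, x ∈ l2) (h3 : l2.Nodup) : l1.length ≤ l2.length := by
  classical
  rw [← List.toFinset_card_of_nodup h1, ← List.toFinset_card_of_nodup h3]
  exact Finset.card_le_card (fun x hx => List.mem_toFinset.2 (h2 x (List.mem_toFinset.1 hx)))

theorem reach_iff_conn (es : List (Char × Char)) (s : Char) (hs : 0 < pvIn es s) :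
    ∀ x, (x ∈ (PySem.List.pyRange 0 (PySem.Set.len (es.foldl pvVertStep PySem.Set.empty)) 1).foldl
        (fun (r : PySem.Set Char) _ => es.foldl pvRelaxEdge r) (PySem.Set.add PySem.Set.empty s))
      ↔ pvConn es s x := by
  obtain ⟨vnd, vmem⟩ := verts_spec es
  have hinit : (PySem.Set.add PySem.Set.empty s) = [s] := rfl
  rw [hinit, foldl_const_iterate (fun r => es.foldl pvRelaxEdge r)]
  have hKlen : (PySem.List.pyRange 0 (PySem.Set.len (es.foldl pvVertStep PySem.Set.empty)) 1).length
      = (es.foldl pvVertStep PySem.Set.empty).length := by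
    rw [PySem.List.length_pyRange_one, PySem.Set.len]
    omega
  rw [hKlen]
  have hsound : ∀ k x, x ∈ (fun r => es.foldl pvRelaxEdge r)^[k] [s] → pvConn es s x := by
    intro k
    induction k with
    | zero =>
      intro x hx
      rcases List.mem_singleton.1 hx with rfl
      exact pvConn.refl
    | succ k ihk =>
      rw [Function.iterate_succ_apply']
      exact foldl_relax_sound (fun e he => he) _ ihk
  have hmemv : ∀ k x, x ∈ (fun r => es.foldl pvRelaxEdge r)^[k] [s] →
      x ∈ es.foldl pvVertStep PySem.Set.empty := by
    intro k
    induction k with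
    | zero =>
      intro x hx
      rcases List.mem_singleton.1 hx with rfl
      exact (vmem x).2 (Or.inr hs)
    | succ k ihk =>
      rw [Function.iterate_succ_apply']
      intro x hx
      rcases foldl_relax_mem _ _ hx with hx' | ⟨e, he, hcase⟩
      · exact ihk x hx'
      · refine (vmem x).2 ?_
        rcases hcase with rfl | rfl
        · exact Or.inl (by simp only [pvOut]; rw [List.countP_pos_iff]; exact ⟨e, he, by simp⟩)
        · exact Or.inr (by simp only [pvIn]; rw [List.countP_pos_iff]; exact ⟨e, he, by simp⟩)
  have hnodup : ∀ k, ((fun r => es.foldl pvRelaxEdge r)^[k] [s]).Nodup := by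
    intro k
    induction k with
    | zero => simp
    | succ k ihk => rw [Function.iterate_succ_apply']; exact foldl_relax_nodup ihk
  have hgrow : ∀ k, ((fun r => es.foldl pvRelaxEdge r)^[k+1] [s]
        = (fun r => es.foldl pvRelaxEdge r)^[k] [s])
      ∨ k + 1 ≤ ((fun r => es.foldl pvRelaxEdge r)^[k] [s]).length := by
    have hit : ∀ (n : Nat), (fun r => es.foldl pvRelaxEdge r)^[n+1] [s]
        = es.foldl pvRelaxEdge ((fun r => es.foldl pvRelaxEdge r)^[n] [s]) :=
      fun n => Function.iterate_succ_apply' _ n [s]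
    intro k
    induction k with
    | zero => exact Or.inr (by simp)
    | succ k ihk =>
      obtain ⟨δ, hδ⟩ := foldl_relax_append es ((fun r => es.foldl pvRelaxEdge r)^[k] [s])
      have hstep : (fun r => es.foldl pvRelaxEdge r)^[k+1] [s]
          = (fun r => es.foldl pvRelaxEdge r)^[k] [s] ++ δ := by
        rw [Function.iterate_succ_apply']
        exact hδ
      rcases ihk with h | h
      · left
        rw [hit (k+1), h, ← hit k]
        exact h
      · rcases List.eq_nil_or_concat δ with rfl | ⟨δ', d, rfl⟩
        · left
          rw [List.append_nil] at hstep
          rw [hit (k+1), hstep, ← hit k]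
          exact hstep
        · right
          have := congrArg List.length hstep
          simp only [List.length_append, List.length_concat] at this
          omega
  have hbound : ∀ k, ((fun r => es.foldl pvRelaxEdge r)^[k] [s]).length
      ≤ (es.foldl pvVertStep PySem.Set.empty).length := by
    intro k
    exact nodup_subset_length (hnodup k) (fun x hx => hmemv k x hx) vnd
  have hfixK : (fun r => es.foldl pvRelaxEdge r)
      ((fun r => es.foldl pvRelaxEdge r)^[(es.foldl pvVertStep PySem.Set.empty).length] [s])
      = (fun r => es.foldl pvRelaxEdge r)^[(es.foldl pvVertStep PySem.Set.empty).length] [s] := by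
    rcases hgrow (es.foldl pvVertStep PySem.Set.empty).length with h | h
    · exact (Function.iterate_succ_apply' (fun r => es.foldl pvRelaxEdge r)
        (es.foldl pvVertStep PySem.Set.empty).length [s]).symm.trans h
    · exfalso
      have := hbound (es.foldl pvVertStep PySem.Set.empty).length
      omega
  have hclosed := foldl_relax_fix hfixK
  have hsreach : ∀ k, s ∈ (fun r => es.foldl pvRelaxEdge r)^[k] [s] := by
    intro k
    induction k with
    | zero => simp
    | succ k ihk =>
      obtain ⟨δ, hδ⟩ := foldl_relax_append es ((fun r => es.foldl pvRelaxEdge r)^[k] [s])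
      rw [Function.iterate_succ_apply', hδ]
      exact List.mem_append_left _ ihk
  have hcomplete : ∀ x, pvConn es s x →
      x ∈ (fun r => es.foldl pvRelaxEdge r)^[(es.foldl pvVertStep PySem.Set.empty).length] [s] := by
    intro x h
    induction h with
    | refl => exact hsreach _
    | fwd hc he ihc => exact (hclosed _ he).1 ihc
    | bwd hc he ihc => exact (hclosed _ he).2 ihc
  intro x
  exact ⟨hsound _ x, hcomplete x⟩

theorem portB_iff (words : List String) (first prev : String)
    (hf : first ≠ "") (hp : prev ≠ "") :
    (can_form_a_circle_py_alt words first prev = true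
      ↔ pvBalanced (pvE words (pvHd first) (pvLst prev))
        ∧ pvAllConn (pvE words (pvHd first) (pvLst prev)) (pvLst prev)) := by
  unfold can_form_a_circle_py_alt
  rw [pyGet_last_some prev hp, pyGet_first_some first hf]
  dsimp only
  set es := words.map pvEdge ++ [(pvHd first, pvLst prev)] with hes
  have hesE : pvE words (pvHd first) (pvLst prev) = es := rfl
  rw [hesE]
  have hs : 0 < pvIn es (pvLst prev) := by
    simp only [pvIn, hes]
    rw [List.countP_pos_iff]
    exact ⟨(pvHd first, pvLst prev), by simp, by simp⟩
  obtain ⟨vnd, vmem⟩ := verts_spec es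
  by_cases hbal : (es.foldl pvBalStep PySem.Dict.empty).values.any (fun d => d != 0) = true
  · rw [if_pos hbal]
    simp only [Bool.false_eq_true, false_iff]
    rintro ⟨hb, -⟩
    rw [← bal_check es] at hb
    rw [hb] at hbal
    exact Bool.false_ne_true hbal
  · have hbal' : pvBalanced es := (bal_check es).1 (Bool.not_eq_true _ ▸ hbal)
    rw [if_neg hbal]
    rw [List.all_eq_true]
    constructor
    · intro hall
      refine ⟨hbal', ?_⟩
      intro e he
      constructor
      · have h1 : e.1 ∈ es.foldl pvVertStep PySem.Set.empty :=
          (vmem e.1).2 (Or.inl (by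
            simp only [pvOut]; rw [List.countP_pos_iff]; exact ⟨e, he, by simp⟩))
        have := hall e.1 h1
        rw [set_contains_iff, reach_iff_conn es _ hs] at this
        exact this
      · have h2 : e.2 ∈ es.foldl pvVertStep PySem.Set.empty :=
          (vmem e.2).2 (Or.inr (by
            simp only [pvIn]; rw [List.countP_pos_iff]; exact ⟨e, he, by simp⟩))
        have := hall e.2 h2
        rw [set_contains_iff, reach_iff_conn es _ hs] at this
        exact this
    · rintro ⟨-, hAll⟩
      intro x hxv
      rw [set_contains_iff, reach_iff_conn es _ hs]
      rcases (vmem x).1 hxv with hout | hin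
      · simp only [pvOut] at hout
        obtain ⟨e, he, hpe⟩ := List.countP_pos_iff.1 hout
        rw [beq_iff_eq] at hpe
        exact hpe ▸ (hAll e he).1
      · simp only [pvIn] at hin
        obtain ⟨e, he, hpe⟩ := List.countP_pos_iff.1 hin
        rw [beq_iff_eq] at hpe
        exact hpe ▸ (hAll e he).2

theorem final_equiv (words : List String) (first prev : String)
    (hnd : words.Nodup) (hf : first ≠ "") (hp : prev ≠ "")
    (hws : ∀ w ∈ words, w ≠ "") :
    can_form_a_circle_py words first prev = can_form_a_circle_py_alt words first prev := by
  rw [portA_eq_chain words.length words rfl first prev hnd hf hp hws, Bool.eq_iff_iff,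
    euler, portB_iff words first prev hf hp]

-- ===== VERDICT (by name: the statement is the Claim_ definition above) =====
theorem can_form_a_circle_py_spec : Claim_equal_can_form_a_circle_py := by
  intro words first prev _hdom hpre
  obtain ⟨hnd, hf, hp, hws⟩ := hpre
  unfold Spec_can_form_a_circle_py
  exact final_equiv words first prev hnd hf hp hws
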